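-- pv_equiv track=rewrite | github.com/RodrigoEC/P1-questions | unidade09/soma_moldura/soma_moldura.py | soma_moldura
-- ===== SOURCE A (Python) =====
-- def soma_moldura(matriz, nivel):
--     soma  = 0
--     if len(matriz[0]) != len(matriz):
--         return soma
--
--     for linha in range(nivel, len(matriz) - nivel):
--         for indice in range(nivel,len(matriz[linha]) - nivel):
--             if linha == nivel or indice == nivel or \
--             linha == len(matriz) - 1 - nivel or indice == len(matriz) - 1 - nivel:
--                 soma += matriz[linha][indice]
--
--     return soma
-- ===== SOURCE B (Python) =====
-- def soma_moldura(matriz, nivel):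
--     n = len(matriz)
--     if len(matriz[0]) != n:
--         return 0
--     lo = nivel
--     hi = n - 1 - nivel
--     if lo > hi:
--         return 0
--     if lo == hi:
--         return matriz[lo][lo]
--     total = sum(matriz[lo][lo:hi + 1]) + sum(matriz[hi][lo:hi + 1])
--     for r in range(lo + 1, hi):
--         total += matriz[r][lo] + matriz[r][hi]
--     return total
-- ===== Notes on version B (the rewrite author's own statement) =====
-- stated objective: alternative
-- what changed: B replaces A's double loop over the whole inner sub-square (with a per-cell border test) by direct summation of the four border edges: two row slices plus one loop over the side columns, touching only the border cells.
-- outside the precondition, e.g. on soma_moldura([[1, 2, 3], [4, 5], [6, 7, 8]], 0): A returns 31, B raises IndexError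
import Mathlib
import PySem

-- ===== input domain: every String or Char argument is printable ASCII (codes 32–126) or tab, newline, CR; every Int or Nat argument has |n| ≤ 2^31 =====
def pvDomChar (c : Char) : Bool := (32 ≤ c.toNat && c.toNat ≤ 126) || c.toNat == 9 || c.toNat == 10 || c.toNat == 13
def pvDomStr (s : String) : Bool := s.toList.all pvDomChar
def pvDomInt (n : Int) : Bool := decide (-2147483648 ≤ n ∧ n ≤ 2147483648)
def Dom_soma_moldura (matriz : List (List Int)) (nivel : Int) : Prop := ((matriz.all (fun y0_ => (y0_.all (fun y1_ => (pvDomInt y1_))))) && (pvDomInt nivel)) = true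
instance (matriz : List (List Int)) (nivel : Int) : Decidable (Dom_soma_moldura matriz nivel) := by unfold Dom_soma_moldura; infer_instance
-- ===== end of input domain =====

-- B sums the four border edges directly (two row slices plus one loop over the side columns)
-- instead of scanning the whole inner sub-square with a per-cell border test (objective: alternative).


-- ===== PORT A =====
def soma_moldura (matriz : List (List Int)) (nivel : Int) : Int :=
  match matriz with
  | [] => 0
  | row0 :: _ =>
    if (row0.length : Int) ≠ (matriz.length : Int) then 0
    else
      (PySem.List.pyRange nivel ((matriz.length : Int) - nivel) 1).foldl
        (fun soma linha =>
          (PySem.List.pyRange nivel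
              (((PySem.List.pyGetD matriz linha []).length : Int) - nivel) 1).foldl
            (fun soma indice =>
              if linha = nivel ∨ indice = nivel ∨
                 linha = (matriz.length : Int) - 1 - nivel ∨
                 indice = (matriz.length : Int) - 1 - nivel then
                soma + PySem.List.pyGetD (PySem.List.pyGetD matriz linha []) indice 0
              else soma)
            soma)
        0

def soma_moldura_alt (matriz : List (List Int)) (nivel : Int) : Int :=
  match matriz with
  | [] => 0
  | row0 :: _ =>
    let n : Int := (matriz.length : Int)
    if (row0.length : Int) ≠ n then 0
    else
      let lo := nivel
      let hi := n - 1 - nivel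
      if lo > hi then 0
      else if lo = hi then PySem.List.pyGetD (PySem.List.pyGetD matriz lo []) lo 0
      else
        let total :=
          (PySem.List.slice (PySem.List.pyGetD matriz lo []) (some lo) (some (hi + 1))).sum +
          (PySem.List.slice (PySem.List.pyGetD matriz hi []) (some lo) (some (hi + 1))).sum
        (PySem.List.pyRange (lo + 1) hi 1).foldl
          (fun total r =>
            total + (PySem.List.pyGetD (PySem.List.pyGetD matriz r []) lo 0 +
                     PySem.List.pyGetD (PySem.List.pyGetD matriz r []) hi 0))
          total

-- ===== PRECONDITION & SPEC =====
-- Pre_ excludes: the empty matrix and (when the first-row square check passes) negative nivel,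
-- on both of which A raises IndexError; and ragged matrices that slip through A's
-- first-row-only square check, where A's per-row truncated sum is an accident of its
-- implementation and B naturally raises IndexError.
def Pre_soma_moldura (matriz : List (List Int)) (nivel : Int) : Prop :=
  matriz ≠ [] ∧
    ((matriz.headD []).length = matriz.length →
      0 ≤ nivel ∧ ∀ row ∈ matriz, row.length = matriz.length)
instance (matriz : List (List Int)) (nivel : Int) : Decidable (Pre_soma_moldura matriz nivel) := by
  unfold Pre_soma_moldura; infer_instance

def pvWitness_soma_moldura : List (List Int) × Int := ([[1, 2], [3, 4]], 0)

def Spec_soma_moldura (matriz : List (List Int)) (nivel : Int) (out : Int) : Prop := out = soma_moldura_alt matriz nivel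
instance (matriz : List (List Int)) (nivel : Int) (out : Int) : Decidable (Spec_soma_moldura matriz nivel out) := by unfold Spec_soma_moldura; infer_instance

-- ===== CLAIM (what is proved, stated in full; the proofs are below) =====
def Claim_equal_soma_moldura : Prop := ∀ (matriz : List (List Int)) (nivel : Int), Dom_soma_moldura matriz nivel → Pre_soma_moldura matriz nivel → Spec_soma_moldura matriz nivel (soma_moldura matriz nivel)

-- ===== LEMMAS AND PROOFS =====

lemma getD_range_take (r : List Int) :
    ∀ (m a : Nat), a + m ≤ r.length →
      (List.range m).map (fun k => r.getD (a + k) 0) = (r.drop a).take m := by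
  intro m
  induction m with
  | zero => intro a _; simp
  | succ m ih =>
    intro a h
    have ha : a < r.length := by omega
    rw [List.range_succ_eq_map, List.drop_eq_getElem_cons ha]
    simp only [List.map_cons, List.map_map, List.take_succ_cons]
    refine congrArg₂ List.cons ?_ ?_
    · simp [List.getElem?_eq_getElem ha]
    · rw [← ih (a + 1) (by omega)]
      apply List.map_congr_left
      intro k _
      simp only [Function.comp]
      congr 1
      omega

lemma map_pyGetD_eq_slice (r : List Int) (a b : Int) (h0 : 0 ≤ a) (hab : a ≤ b)
    (hb : b ≤ (r.length : Int)) :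
    (PySem.List.pyRange a b 1).map (fun i => PySem.List.pyGetD r i 0) =
      PySem.List.slice r (some a) (some b) := by
  rw [PySem.List.slice_toNat r h0 (le_trans h0 hab), PySem.List.pyRange_one, List.map_map]
  have hba : b.toNat - a.toNat = (b - a).toNat := by omega
  rw [hba, ← getD_range_take r (b - a).toNat a.toNat (by omega)]
  apply List.map_congr_left
  intro k _
  have h2 : a + (k : Int) = ((a.toNat + k : Nat) : Int) := by omega
  simp only [Function.comp, h2, PySem.List.pyGetD_natCast]


lemma a_eq_b (matriz : List (List Int)) (nivel : Int)
    (hne : matriz ≠ [])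
    (hsq : (matriz.headD []).length = matriz.length →
      0 ≤ nivel ∧ ∀ row ∈ matriz, row.length = matriz.length) :
    soma_moldura matriz nivel = soma_moldura_alt matriz nivel := by
  cases matriz with
  | nil => exact absurd rfl hne
  | cons row0 rest =>
    by_cases hck : (row0.length : Int) = (((row0 :: rest) : List (List Int)).length : Int)
    case neg =>
      have hck' : ¬ (row0.length : Int) = (rest.length : Int) + 1 := by simpa using hck
      simp [soma_moldura, soma_moldura_alt, hck']
    case pos =>
      obtain ⟨hniv, hrect⟩ := hsq (by exact_mod_cast hck)
      have hA : soma_moldura (row0 :: rest) nivel =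
          ((PySem.List.pyRange nivel (((row0 :: rest).length : Int) - nivel) 1).map
            (fun linha =>
              ((PySem.List.pyRange nivel (((row0 :: rest).length : Int) - nivel) 1).map
                (fun i =>
                  if linha = nivel ∨ i = nivel ∨
                     linha = ((row0 :: rest).length : Int) - 1 - nivel ∨
                     i = ((row0 :: rest).length : Int) - 1 - nivel then
                    PySem.List.pyGetD (PySem.List.pyGetD (row0 :: rest) linha []) i 0
                  else 0)).sum)).sum := by
        simp only [soma_moldura, if_neg (not_not.mpr hck)]
        rw [PySem.List.foldl_congr_mem' _ _
          (fun s linha =>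
            s + ((PySem.List.pyRange nivel (((row0 :: rest).length : Int) - nivel) 1).map
                (fun i =>
                  if linha = nivel ∨ i = nivel ∨
                     linha = ((row0 :: rest).length : Int) - 1 - nivel ∨
                     i = ((row0 :: rest).length : Int) - 1 - nivel then
                    PySem.List.pyGetD (PySem.List.pyGetD (row0 :: rest) linha []) i 0
                  else 0)).sum) 0 ?_]
        · rw [PySem.List.foldl_add]
          simp
        · intro linha hl s
          have hlin := PySem.List.mem_pyRange_one.mp hl
          have hrlen : (PySem.List.pyGetD (row0 :: rest) linha []).length = (row0 :: rest).length := by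
            refine hrect _ (PySem.List.pyGetD_mem _ _ ?_)
            constructor <;> omega
          rw [hrlen]
          rw [PySem.List.foldl_congr_mem' _ _
            (fun s i =>
              s + (if linha = nivel ∨ i = nivel ∨
                     linha = ((row0 :: rest).length : Int) - 1 - nivel ∨
                     i = ((row0 :: rest).length : Int) - 1 - nivel then
                    PySem.List.pyGetD (PySem.List.pyGetD (row0 :: rest) linha []) i 0
                  else 0)) s ?_]
          · rw [PySem.List.foldl_add]
          · intro i _ acc
            beta_reduce
            by_cases hc : linha = nivel ∨ i = nivel ∨
                     linha = ((row0 :: rest).length : Int) - 1 - nivel ∨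
                     i = ((row0 :: rest).length : Int) - 1 - nivel
            · rw [if_pos hc, if_pos hc]
            · rw [if_neg hc, if_neg hc, add_zero]
      set N : Int := (((row0 :: rest) : List (List Int)).length : Int) with hNdef
      set H : Int → Int := (fun linha =>
              ((PySem.List.pyRange nivel (N - nivel) 1).map
                (fun i =>
                  if linha = nivel ∨ i = nivel ∨
                     linha = N - 1 - nivel ∨
                     i = N - 1 - nivel then
                    PySem.List.pyGetD (PySem.List.pyGetD (row0 :: rest) linha []) i 0
                  else 0)).sum) with hH
      have hlen : ∀ linha : Int, nivel ≤ linha → linha < N - nivel →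
          ((PySem.List.pyGetD (row0 :: rest) linha []).length : Int) = N := by
        intro linha h1 h2
        have := hrect _ (PySem.List.pyGetD_mem (row0 :: rest) ([] : List Int)
          (⟨by omega, by omega⟩ : PySem.Raise.InRange (row0 :: rest).length linha))
        rw [hNdef]
        exact_mod_cast this
      rcases lt_trichotomy nivel (N - 1 - nivel) with hlt | heq | hgt
      · -- nivel < N - 1 - nivel : genuine frame with at least two rows
        have houter : PySem.List.pyRange nivel (N - nivel) 1 =
            nivel :: (PySem.List.pyRange (nivel + 1) (N - 1 - nivel) 1 ++ [N - 1 - nivel]) := by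
          rw [show N - nivel = (N - 1 - nivel) + 1 by ring,
            PySem.List.pyRange_one_succ_right (by omega),
            PySem.List.pyRange_one_cons (by omega), List.cons_append]
        have hTop : H nivel =
            (PySem.List.slice (PySem.List.pyGetD (row0 :: rest) nivel [])
              (some nivel) (some (N - 1 - nivel + 1))).sum := by
          rw [hH]
          beta_reduce
          rw [List.map_congr_left (fun i _ => if_pos (Or.inl rfl)),
            show N - nivel = N - 1 - nivel + 1 by ring,
            map_pyGetD_eq_slice _ _ _ hniv (by omega) (by rw [hlen nivel le_rfl (by omega)]; omega)]
        have hBot : H (N - 1 - nivel) =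
            (PySem.List.slice (PySem.List.pyGetD (row0 :: rest) (N - 1 - nivel) [])
              (some nivel) (some (N - 1 - nivel + 1))).sum := by
          rw [hH]
          beta_reduce
          rw [List.map_congr_left (fun i _ => if_pos (Or.inr (Or.inr (Or.inl rfl)))),
            show N - nivel = N - 1 - nivel + 1 by ring,
            map_pyGetD_eq_slice _ _ _ hniv (by omega)
              (by rw [hlen (N - 1 - nivel) (by omega) (by omega)]; omega)]
        have hMid : ∀ linha ∈ PySem.List.pyRange (nivel + 1) (N - 1 - nivel) 1,
            H linha = PySem.List.pyGetD (PySem.List.pyGetD (row0 :: rest) linha []) nivel 0 +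
                      PySem.List.pyGetD (PySem.List.pyGetD (row0 :: rest) linha []) (N - 1 - nivel) 0 := by
          intro linha hl
          have hlb := PySem.List.mem_pyRange_one.mp hl
          rw [hH]
          beta_reduce
          rw [houter]
          simp only [List.map_cons, List.map_append, List.sum_cons, List.sum_append,
            List.map_nil, List.sum_nil, add_zero]
          simp only [true_or, or_true, if_true]
          have hz : ((PySem.List.pyRange (nivel + 1) (N - 1 - nivel) 1).map
              (fun i =>
                  if linha = nivel ∨ i = nivel ∨ linha = N - 1 - nivel ∨ i = N - 1 - nivel then
                    PySem.List.pyGetD (PySem.List.pyGetD (row0 :: rest) linha []) i 0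
                  else 0)).sum = 0 := by
            apply List.sum_eq_zero
            intro x hx
            obtain ⟨i, hi, hxe⟩ := List.mem_map.mp hx
            have hib := PySem.List.mem_pyRange_one.mp hi
            rw [if_neg (by push Not; refine ⟨by omega, by omega, by omega, by omega⟩)] at hxe
            omega
          rw [hz]
          ring
        rw [hA, houter, List.map_cons, List.map_append, List.map_cons, List.map_nil,
          List.sum_cons, List.sum_append, List.sum_cons, List.sum_nil, add_zero,
          hTop, hBot, List.map_congr_left hMid]
        simp only [soma_moldura_alt]
        rw [← hNdef, if_neg (not_not.mpr hck), if_neg (by omega : ¬ nivel > N - 1 - nivel),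
          if_neg (by omega : ¬ nivel = N - 1 - nivel), PySem.List.foldl_add]
        ring
      · -- nivel = N - 1 - nivel : single central element
        have h1 : N - nivel = nivel + 1 := by omega
        have hone : H nivel = PySem.List.pyGetD (PySem.List.pyGetD (row0 :: rest) nivel []) nivel 0 := by
          rw [hH]
          beta_reduce
          rw [h1, PySem.List.pyRange_one_singleton]
          simp only [List.map_cons, List.map_nil, List.sum_cons, List.sum_nil, add_zero,
            true_or, if_true]
        rw [hA, h1, PySem.List.pyRange_one_singleton, List.map_cons, List.map_nil,
          List.sum_cons, List.sum_nil, add_zero, hone]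
        simp only [soma_moldura_alt]
        rw [← hNdef, if_neg (not_not.mpr hck), if_neg (by omega : ¬ nivel > N - 1 - nivel),
          if_pos heq]
      · -- frame empty: nivel past the middle
        rw [hA, PySem.List.pyRange_one_eq_nil (by omega), List.map_nil, List.sum_nil]
        simp only [soma_moldura_alt]
        rw [← hNdef, if_neg (not_not.mpr hck), if_pos (by omega : nivel > N - 1 - nivel)]

-- ===== VERDICT (by name: the statement is the Claim_ definition above) =====
theorem soma_moldura_spec : Claim_equal_soma_moldura := by
  intro matriz nivel _ hpre
  unfold Spec_soma_moldura
  exact a_eq_b matriz nivel hpre.1 hpre.2
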